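-- pv_equiv track=rewrite | github.com/itnet-technologies/axmaril | AXMARIL/api/v2/utils/helpers.py | check_keys_and_null_values
-- ===== SOURCE A (Python) =====
-- def check_keys_and_null_values(array, dictionary):
--     missing_keys = []
--     null_value_keys = []
--
--     for key in array:
--         if key not in dictionary:
--             missing_keys.append(key)
--         elif dictionary[key] is None:
--             null_value_keys.append(key)
--
--     if missing_keys or null_value_keys:
--         return False, missing_keys + null_value_keys
--     else:
--         return True, []
-- ===== SOURCE B (Python) =====
-- def check_keys_and_null_values(array, dictionary):
--     # rank: 0 = missing, 1 = present but None, 2 = present with a value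
--     def rank(k):
--         if k not in dictionary:
--             return 0
--         return 1 if dictionary[k] is None else 2
--     # stable sort partitions the array into missing-then-null-then-ok,
--     # preserving original order inside each class; drop the ok keys.
--     combined = [k for k in sorted(array, key=rank) if rank(k) < 2]
--     return (not combined, combined)
-- ===== Notes on version B (the rewrite author's own statement) =====
-- stated objective: alternative
-- what changed: Replaces A's single interleaved accumulator loop by a stable sort of the array on a 3-valued rank (missing=0, null=1, ok=2) followed by one filter dropping rank-2 keys; stability makes the sorted order exactly missing-then-nulls in original order.
import Mathlib
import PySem

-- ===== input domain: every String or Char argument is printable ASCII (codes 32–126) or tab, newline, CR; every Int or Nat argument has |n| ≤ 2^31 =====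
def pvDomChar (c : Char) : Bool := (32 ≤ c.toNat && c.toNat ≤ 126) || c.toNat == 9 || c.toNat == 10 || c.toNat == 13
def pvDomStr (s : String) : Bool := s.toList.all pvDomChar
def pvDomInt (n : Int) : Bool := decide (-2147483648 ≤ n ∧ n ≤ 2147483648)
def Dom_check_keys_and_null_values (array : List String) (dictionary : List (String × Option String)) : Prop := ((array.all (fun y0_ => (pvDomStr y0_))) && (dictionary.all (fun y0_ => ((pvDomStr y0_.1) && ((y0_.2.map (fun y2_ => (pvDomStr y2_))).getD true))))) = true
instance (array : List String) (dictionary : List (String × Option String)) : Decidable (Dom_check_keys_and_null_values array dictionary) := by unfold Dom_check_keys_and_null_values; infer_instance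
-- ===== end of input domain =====

-- B replaces A's interleaved accumulator loop by a stable sort on a 3-valued
-- rank (missing=0, null=1, ok=2) followed by one filter; objective: alternative.

-- shared dict primitive: first-match lookup ('key in dictionary' / 'dictionary[key]')
def pvLookup (dictionary : List (String × Option String)) (key : String) : Option (Option String) :=
  match dictionary with
  | [] => none
  | (k, v) :: rest => if k == key then some v else pvLookup rest key

-- ===== PORT A =====
def check_keys_and_null_values (array : List String) (dictionary : List (String × Option String)) : Bool × List String :=
  let acc := array.foldl (fun (acc : List String × List String) key =>
    match pvLookup dictionary key with
    | none => (acc.1 ++ [key], acc.2)          -- key not in dictionary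
    | some none => (acc.1, acc.2 ++ [key])      -- dictionary[key] is None
    | some (some _) => acc) ([], [])
  if acc.1.isEmpty && acc.2.isEmpty then (true, []) else (false, acc.1 ++ acc.2)

-- ===== PORT B =====
-- rank(k): 0 = missing, 1 = present but None, 2 = present with a value
def pvRank (dictionary : List (String × Option String)) (k : String) : Int :=
  match pvLookup dictionary k with
  | none => 0
  | some none => 1
  | some (some _) => 2

def check_keys_and_null_values_alt (array : List String) (dictionary : List (String × Option String)) : Bool × List String :=
  let combined := (PySem.List.sorted array (fun k => pvRank dictionary k)).filter
    (fun k => decide (pvRank dictionary k < 2))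
  (combined.isEmpty, combined)

-- ===== PRECONDITION & SPEC =====
def Spec_check_keys_and_null_values (array : List String) (dictionary : List (String × Option String)) (out : Bool × List String) : Prop := out = check_keys_and_null_values_alt array dictionary
instance (array : List String) (dictionary : List (String × Option String)) (out : Bool × List String) : Decidable (Spec_check_keys_and_null_values array dictionary out) := by unfold Spec_check_keys_and_null_values; infer_instance

-- ===== CLAIM =====
def Claim_equal_check_keys_and_null_values : Prop := ∀ (array : List String) (dictionary : List (String × Option String)), Dom_check_keys_and_null_values array dictionary → Spec_check_keys_and_null_values array dictionary (check_keys_and_null_values array dictionary)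

-- ===== LEMMAS AND PROOFS =====

-- insertBy places x after a prefix it does not go before and in front of a suffix it does
theorem insertBy_split {α : Type} (bef : α → α → Bool) (x : α) :
    ∀ (p s : List α), (∀ y ∈ p, bef x y = false) → (∀ y ∈ s, bef x y = true) →
      PySem.List.insertBy bef x (p ++ s) = p ++ x :: s := by
  intro p
  induction p with
  | nil =>
      intro s _ hs
      cases s with
      | nil => simp [PySem.List.insertBy]
      | cons z t => simp [PySem.List.insertBy, hs z (by simp)]
  | cons y p ih =>
      intro s hp hs
      have hy : bef x y = false := hp y (by simp)
      simp only [List.cons_append, PySem.List.insertBy, hy]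
      simp [ih s (fun z hz => hp z (by simp [hz])) hs]

-- stable insertion sort on a rank with values in {0,1,2} = the three rank classes in order
theorem sorted_rank_eq_filters (dictionary : List (String × Option String)) (array : List String) :
    PySem.List.sorted array (fun k => pvRank dictionary k)
      = array.filter (fun k => pvRank dictionary k == 0)
        ++ array.filter (fun k => pvRank dictionary k == 1)
        ++ array.filter (fun k => pvRank dictionary k == 2) := by
  have hrange : ∀ k, pvRank dictionary k = 0 ∨ pvRank dictionary k = 1 ∨ pvRank dictionary k = 2 := by
    intro k
    unfold pvRank
    cases pvLookup dictionary k with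
    | none => simp
    | some v => cases v <;> simp
  rw [PySem.List.sorted_eq_foldl_insertBy]
  suffices h : ∀ (xs a b c : List String),
      (∀ y ∈ a, pvRank dictionary y = 0) → (∀ y ∈ b, pvRank dictionary y = 1) →
      (∀ y ∈ c, pvRank dictionary y = 2) →
      xs.foldl (fun acc x => PySem.List.insertBy
          (fun p q => decide (pvRank dictionary p < pvRank dictionary q)) x acc) (a ++ b ++ c)
        = (a ++ xs.filter (fun k => pvRank dictionary k == 0))
          ++ (b ++ xs.filter (fun k => pvRank dictionary k == 1))
          ++ (c ++ xs.filter (fun k => pvRank dictionary k == 2)) by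
    simpa using h array [] [] [] (by simp) (by simp) (by simp)
  intro xs
  induction xs with
  | nil => intro a b c _ _ _; simp
  | cons x xs ih =>
      intro a b c ha hb hc
      simp only [List.foldl_cons, List.filter_cons]
      rcases hrange x with hx | hx | hx
      · -- x is missing: goes after a (stability), before b ++ c
        have : PySem.List.insertBy
            (fun p q => decide (pvRank dictionary p < pvRank dictionary q)) x (a ++ b ++ c)
            = a ++ x :: (b ++ c) := by
          rw [List.append_assoc]
          refine insertBy_split _ x a (b ++ c) ?_ ?_
          · intro y hy; simp [hx, ha y hy]
          · intro y hy
            rcases List.mem_append.mp hy with h | h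
            · simp [hx, hb y h]
            · simp [hx, hc y h]
        rw [this, hx]
        have := ih (a ++ [x]) b c
          (by intro y hy; rcases List.mem_append.mp hy with h | h
              · exact ha y h
              · simp at h; simpa [h] using hx) hb hc
        simpa using this
      · -- x is null-valued: goes after a ++ b, before c
        have : PySem.List.insertBy
            (fun p q => decide (pvRank dictionary p < pvRank dictionary q)) x (a ++ b ++ c)
            = (a ++ b) ++ x :: c := by
          refine insertBy_split _ x (a ++ b) c ?_ ?_
          · intro y hy
            rcases List.mem_append.mp hy with h | h
            · simp [hx, ha y h]
            · simp [hx, hb y h]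
          · intro y hy; simp [hx, hc y hy]
        rw [this, hx]
        have := ih a (b ++ [x]) c ha
          (by intro y hy; rcases List.mem_append.mp hy with h | h
              · exact hb y h
              · simp at h; simpa [h] using hx) hc
        simpa using this
      · -- x is present with a value: goes at the very end
        have : PySem.List.insertBy
            (fun p q => decide (pvRank dictionary p < pvRank dictionary q)) x (a ++ b ++ c)
            = (a ++ b ++ c) ++ [x] := by
          refine PySem.List.insertBy_of_forall_not_before _ x _ ?_
          intro y hy
          rcases List.mem_append.mp hy with h | h
          · rcases List.mem_append.mp h with h' | h'
            · simp [hx, ha y h']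
            · simp [hx, hb y h']
          · simp [hx, hc y h]
        rw [this, hx]
        have := ih a b (c ++ [x]) ha hb
          (by intro y hy; rcases List.mem_append.mp hy with h | h
              · exact hc y h
              · simp at h; simpa [h] using hx)
        simpa using this

-- A's loop state after the whole pass = the rank-0 / rank-1 classes, appended to the incoming state
theorem foldl_eq_filters (dictionary : List (String × Option String)) :
    ∀ (array : List String) (m n : List String),
      array.foldl (fun (acc : List String × List String) key =>
        match pvLookup dictionary key with
        | none => (acc.1 ++ [key], acc.2)
        | some none => (acc.1, acc.2 ++ [key])
        | some (some _) => acc) (m, n)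
      = (m ++ array.filter (fun k => pvRank dictionary k == 0),
         n ++ array.filter (fun k => pvRank dictionary k == 1)) := by
  intro array
  induction array with
  | nil => simp
  | cons k rest ih =>
      intro m n
      simp only [List.foldl_cons, List.filter_cons]
      cases h : pvLookup dictionary k with
      | none =>
          have hr : pvRank dictionary k = 0 := by simp [pvRank, h]
          simp [hr, ih]
      | some v =>
          cases v with
          | none =>
              have hr : pvRank dictionary k = 1 := by simp [pvRank, h]
              simp [hr, ih]
          | some s =>
              have hr : pvRank dictionary k = 2 := by simp [pvRank, h]
              simp [hr, ih]

-- ===== VERDICT =====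
theorem check_keys_and_null_values_spec : Claim_equal_check_keys_and_null_values := by
  intro array dictionary _
  unfold Spec_check_keys_and_null_values check_keys_and_null_values check_keys_and_null_values_alt
  rw [foldl_eq_filters, sorted_rank_eq_filters]
  simp only [List.nil_append, List.filter_append]
  have e0 : (array.filter (fun k => pvRank dictionary k == 0)).filter
      (fun k => decide (pvRank dictionary k < 2)) = array.filter (fun k => pvRank dictionary k == 0) := by
    apply List.filter_eq_self.mpr
    intro y hy
    have := (List.mem_filter.mp hy).2
    simp at this ⊢
    omega
  have e1 : (array.filter (fun k => pvRank dictionary k == 1)).filter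
      (fun k => decide (pvRank dictionary k < 2)) = array.filter (fun k => pvRank dictionary k == 1) := by
    apply List.filter_eq_self.mpr
    intro y hy
    have := (List.mem_filter.mp hy).2
    simp at this ⊢
    omega
  have e2 : (array.filter (fun k => pvRank dictionary k == 2)).filter
      (fun k => decide (pvRank dictionary k < 2)) = [] := by
    apply List.filter_eq_nil_iff.mpr
    intro y hy
    have := (List.mem_filter.mp hy).2
    simp at this ⊢
    omega
  rw [e0, e1, e2, List.append_nil]
  set ms := array.filter (fun k => pvRank dictionary k == 0)
  set ns := array.filter (fun k => pvRank dictionary k == 1)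
  by_cases hms : ms = [] <;> by_cases hns : ns = [] <;> simp [hms, hns]
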